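-- pv_equiv track=rewrite | github.com/arturoornelasb/tibia-bonelord-469-cipher | archive/scripts/analysis/session27_apply.py | dp_score
-- ===== SOURCE A (Python) =====
-- def dp_score(text, known_set):
--     n = len(text)
--     dp = [0] * (n + 1)
--     for i in range(1, n + 1):
--         dp[i] = dp[i-1]
--         for wlen in range(2, min(i, 20) + 1):
--             s = i - wlen
--             if text[s:i] in known_set:
--                 dp[i] = max(dp[i], dp[s] + wlen)
--     return dp[n]
-- ===== SOURCE B (Python) =====
-- def dp_score(text, known_set):
--     n = len(text)
--     # Stage 1: occurrence index — for every known word of usable length (2..20),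
--     # record every occurrence in text as an interval, grouped by its end position.
--     starts_by_end = [[] for _ in range(n + 1)]
--     for w in dict.fromkeys(known_set):
--         L = len(w)
--         if 2 <= L <= 20:
--             s = text.find(w)
--             while s != -1:
--                 starts_by_end[s + L].append(s)
--                 s = text.find(w, s + 1)
--     # Stage 2: weighted interval scheduling over the recorded occurrences,
--     # carrying the best score of each prefix forward.
--     dp = [0] * (n + 1)
--     for e in range(1, n + 1):
--         best = dp[e - 1]
--         for s in starts_by_end[e]:
--             cand = dp[s] + (e - s)
--             if cand > best:
--                 best = cand
--         dp[e] = best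
--     return dp[n]
-- ===== Notes on version B (the rewrite author's own statement) =====
-- stated objective: alternative
-- what changed: Replaces A's window-scan DP (each end position membership-tests its 2..20-length slices against known_set) by a two-stage algorithm: first build an occurrence index of every known word's occurrences in text (words deduplicated, occurrences found with repeated str.find, grouped by end position), then run weighted interval scheduling over those recorded intervals with a carried prefix best; the DP no longer scans window lengths or touches known_set at all.
import Mathlib
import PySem

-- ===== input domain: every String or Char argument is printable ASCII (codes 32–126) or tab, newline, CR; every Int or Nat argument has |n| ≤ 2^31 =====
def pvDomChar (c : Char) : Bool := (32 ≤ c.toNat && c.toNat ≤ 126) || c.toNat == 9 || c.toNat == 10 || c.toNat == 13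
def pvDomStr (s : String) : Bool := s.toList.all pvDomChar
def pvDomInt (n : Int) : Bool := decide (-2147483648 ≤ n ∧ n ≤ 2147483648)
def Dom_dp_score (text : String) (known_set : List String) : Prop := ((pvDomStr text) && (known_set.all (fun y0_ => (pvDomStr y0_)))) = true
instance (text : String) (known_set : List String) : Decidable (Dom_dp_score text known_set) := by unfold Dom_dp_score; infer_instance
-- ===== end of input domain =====

-- B replaces A's window-scan DP by a different algorithm: first an occurrence index of all
-- known-word occurrences in text (grouped by end position), then weighted interval scheduling
-- over those intervals with a carried prefix best (alternative algorithm, same result).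

-- ===== PORT A =====
-- dp is modelled as a total map Nat → Int (index range 0..n is the only part ever touched).
def dp_score (text : String) (known_set : List String) : Int :=
  let n := text.toList.length                                -- n = len(text)
  let dp : Nat → Int :=
    (List.range' 1 n).foldl (fun dp i =>                     -- for i in range(1, n + 1):
      let dp := Function.update dp i (dp (i - 1))            --   dp[i] = dp[i-1]
      (List.range' 2 (min i 20 - 1)).foldl (fun dp wlen =>   --   for wlen in range(2, min(i, 20) + 1):  (s = i - wlen inlined)
        if PySem.Str.slice text (some ((i - wlen : Nat) : Int)) (some ((i : Nat) : Int)) ∈ known_set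
        then Function.update dp i (max (dp i) (dp (i - wlen) + (wlen : Int)))
        else dp) dp) (fun _ => 0)                            -- dp = [0] * (n + 1)
  dp n

-- ===== PORT B =====
-- starts_by_end is modelled as a total map Nat → List Nat (cells 0..n are the only ones touched).
-- occLoop is the `s = text.find(w); while s != -1: ...` loop of stage 1; fuel (called with n+1)
-- is a totality guard only: each find result is strictly larger than the previous start.
def occLoop (text w : String) (L : Nat) : Nat → Int → (Nat → List Nat) → (Nat → List Nat)
  | 0, _, m => m
  | fuel+1, s, m =>
    if s = -1 then m                                       -- while s != -1:
    else occLoop text w L fuel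
      (PySem.Str.findFrom text w (s + 1) none)             --   s = text.find(w, s + 1)
      (Function.update m (s.toNat + L) (m (s.toNat + L) ++ [s.toNat]))  --   starts_by_end[s+L].append(s)

def dp_score_alt (text : String) (known_set : List String) : Int :=
  let n := text.toList.length                              -- n = len(text)
  let sbe : Nat → List Nat :=
    (PySem.List.dedup known_set).foldl (fun m w =>         -- for w in dict.fromkeys(known_set):
      let L := w.toList.length                             --   L = len(w)
      if 2 ≤ L ∧ L ≤ 20 then                               --   if 2 <= L <= 20:
        occLoop text w L (n + 1) (PySem.Str.find text w) m --     s = text.find(w); while loop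
      else m) (fun _ => [])                                -- starts_by_end = [[] for _ in range(n+1)]
  let dp : Nat → Int :=
    (List.range' 1 n).foldl (fun dp e =>                   -- for e in range(1, n + 1):
      Function.update dp e
        ((sbe e).foldl (fun best s =>                      --   best = dp[e-1]; for s in starts_by_end[e]:
          if dp s + ((e - s : Nat) : Int) > best           --     cand = dp[s] + (e - s)
          then dp s + ((e - s : Nat) : Int) else best)     --     if cand > best: best = cand
          (dp (e - 1)))) (fun _ => 0)                      -- dp = [0] * (n + 1); dp[e] = best
  dp n

-- ===== PRECONDITION & SPEC =====
def Spec_dp_score (text : String) (known_set : List String) (out : Int) : Prop := out = dp_score_alt text known_set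
instance (text : String) (known_set : List String) (out : Int) : Decidable (Spec_dp_score text known_set out) := by unfold Spec_dp_score; infer_instance

-- ===== CLAIM (what is proved, stated in full; the proofs are below) =====
def Claim_equal_dp_score : Prop := ∀ (text : String) (known_set : List String), Dom_dp_score text known_set → Spec_dp_score text known_set (dp_score text known_set)

-- ===== LEMMAS AND PROOFS =====

-- max-fold: fold of `acc ↦ max acc (v x)` over the members of L satisfying c
def mfold {α : Type} (v : α → Int) (c : α → Prop) [DecidablePred c] (b : Int) (L : List α) : Int :=
  L.foldl (fun acc x => if c x then max acc (v x) else acc) b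

theorem mfold_nil {α : Type} (v : α → Int) (c : α → Prop) [DecidablePred c] (b : Int) :
    mfold v c b [] = b := rfl

theorem mfold_cons {α : Type} (v : α → Int) (c : α → Prop) [DecidablePred c] (b : Int)
    (x : α) (L : List α) :
    mfold v c b (x :: L) = mfold v c (if c x then max b (v x) else b) L := rfl

theorem base_le_mfold {α : Type} (v : α → Int) (c : α → Prop) [DecidablePred c]
    (L : List α) : ∀ b : Int, b ≤ mfold v c b L := by
  induction L with
  | nil => intro b; simp [mfold_nil]
  | cons x L ih =>
    intro b
    rw [mfold_cons]
    refine le_trans ?_ (ih _)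
    split <;> simp

theorem le_mfold_of_mem {α : Type} (v : α → Int) (c : α → Prop) [DecidablePred c]
    {x : α} {L : List α} (hx : x ∈ L) (hc : c x) : ∀ b : Int, v x ≤ mfold v c b L := by
  induction L with
  | nil => cases hx
  | cons y L ih =>
    intro b
    rw [mfold_cons]
    rcases List.mem_cons.mp hx with h | h
    · subst h
      refine le_trans ?_ (base_le_mfold v c L _)
      simp [hc]
    · exact ih h _

theorem mfold_le {α : Type} (v : α → Int) (c : α → Prop) [DecidablePred c]
    {z : Int} (L : List α) (h : ∀ x ∈ L, c x → v x ≤ z) :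
    ∀ b : Int, b ≤ z → mfold v c b L ≤ z := by
  induction L with
  | nil => intro b hb; simpa [mfold_nil] using hb
  | cons x L ih =>
    intro b hb
    rw [mfold_cons]
    refine ih (fun y hy hcy => h y (List.mem_cons_of_mem _ hy) hcy) _ ?_
    by_cases hcx : c x
    · rw [if_pos hcx]; exact max_le hb (h x List.mem_cons_self hcx)
    · rw [if_neg hcx]; exact hb

theorem mfold_congr {α : Type} (v v' : α → Int) (c c' : α → Prop)
    [DecidablePred c] [DecidablePred c'] (L : List α)
    (hv : ∀ x ∈ L, v x = v' x) (hc : ∀ x ∈ L, c x ↔ c' x) :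
    ∀ b : Int, mfold v c b L = mfold v' c' b L := by
  induction L with
  | nil => intro b; rfl
  | cons x L ih =>
    intro b
    rw [mfold_cons, mfold_cons]
    rw [ih (fun y hy => hv y (List.mem_cons_of_mem _ hy))
          (fun y hy => hc y (List.mem_cons_of_mem _ hy))]
    congr 1
    by_cases h : c x
    · rw [if_pos h, if_pos ((hc x List.mem_cons_self).mp h), hv x List.mem_cons_self]
    · rw [if_neg h, if_neg (fun h' => h ((hc x List.mem_cons_self).mpr h'))]

-- the comparison loop of B's stage 2 is a max-fold with the trivially-true condition
theorem foldl_if_gt_eq_mfold (v : Nat → Int) (L : List Nat) :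
    ∀ b : Int, L.foldl (fun best s => if v s > best then v s else best) b
      = mfold v (fun _ => True) b L := by
  induction L with
  | nil => intro b; rfl
  | cons x L ih =>
    intro b
    rw [List.foldl_cons, mfold_cons, if_pos trivial, ih]
    congr 1
    omega

-- the common value computed by both programs: FF k = best score of a segmentation of text[:k]
def FF (text : String) (known_set : List String) : Nat → Int
  | 0 => 0
  | (k+1) =>
    ((List.range' 2 (min (k+1) 20 - 1)).attach).foldl
      (fun acc w =>
        if PySem.Str.slice text (some ((k + 1 - w.1 : Nat) : Int)) (some ((k + 1 : Nat) : Int)) ∈ known_set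
        then max acc (FF text known_set (k + 1 - w.1) + (w.1 : Int)) else acc)
      (FF text known_set k)
  decreasing_by
  · have := List.mem_range'_1.mp w.2; omega
  · omega

theorem FF_succ (text : String) (known_set : List String) (k : Nat) :
    FF text known_set (k+1) =
      mfold (fun (wlen : Nat) => FF text known_set (k + 1 - wlen) + (wlen : Int))
        (fun wlen => PySem.Str.slice text (some ((k + 1 - wlen : Nat) : Int)) (some ((k + 1 : Nat) : Int)) ∈ known_set)
        (FF text known_set k) (List.range' 2 (min (k+1) 20 - 1)) := by
  rw [FF, mfold]
  exact List.foldl_attach (f := fun acc x =>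
    if PySem.Str.slice text (some ((k + 1 - x : Nat) : Int)) (some ((k + 1 : Nat) : Int)) ∈ known_set
    then max acc (FF text known_set (k + 1 - x) + (x : Int)) else acc) ..

theorem FF_le_succ (text : String) (known_set : List String) (k : Nat) :
    FF text known_set k ≤ FF text known_set (k+1) := by
  rw [FF_succ]; exact base_le_mfold _ _ _ _

-- ---------- A side ----------

-- A's loop body, definitionally the inline lambda of dp_score
def sA (text : String) (known_set : List String) : (Nat → Int) → Nat → (Nat → Int) :=
  fun dp i =>
    let dp := Function.update dp i (dp (i - 1))
    (List.range' 2 (min i 20 - 1)).foldl (fun dp wlen =>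
      if PySem.Str.slice text (some ((i - wlen : Nat) : Int)) (some ((i : Nat) : Int)) ∈ known_set
      then Function.update dp i (max (dp i) (dp (i - wlen) + (wlen : Int)))
      else dp) dp

-- the inner loop of A only writes cell i and reads cells i - wlen < i
theorem foldA_inner (text : String) (known_set : List String) (i : Nat) (hi : 1 ≤ i) :
    ∀ (L : List Nat), (∀ w ∈ L, 1 ≤ w) → ∀ d : Nat → Int,
    L.foldl (fun dp wlen =>
      if PySem.Str.slice text (some ((i - wlen : Nat) : Int)) (some ((i : Nat) : Int)) ∈ known_set
      then Function.update dp i (max (dp i) (dp (i - wlen) + (wlen : Int)))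
      else dp) d
    = Function.update d i (mfold (fun (wlen : Nat) => d (i - wlen) + (wlen : Int))
        (fun wlen => PySem.Str.slice text (some ((i - wlen : Nat) : Int)) (some ((i : Nat) : Int)) ∈ known_set)
        (d i) L) := by
  intro L
  induction L with
  | nil => intro _ d; simp [mfold_nil, Function.update_eq_self]
  | cons w0 L ih =>
    intro hL d
    have hw0 : 1 ≤ w0 := hL w0 List.mem_cons_self
    have hL' : ∀ w ∈ L, 1 ≤ w := fun w hw => hL w (List.mem_cons_of_mem _ hw)
    rw [List.foldl_cons, mfold_cons]
    by_cases hc : PySem.Str.slice text (some ((i - w0 : Nat) : Int)) (some ((i : Nat) : Int)) ∈ known_set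
    · rw [if_pos hc, if_pos hc,
        ih hL' (Function.update d i (max (d i) (d (i - w0) + (w0 : Int))))]
      rw [Function.update_idem]
      congr 1
      rw [mfold_congr
          (v' := fun wlen => d (i - wlen) + (wlen : Int)) (c' := fun (wlen : Nat) =>
            PySem.Str.slice text (some ((i - wlen : Nat) : Int)) (some ((i : Nat) : Int)) ∈ known_set)
          (hv := ?_) (hc := fun x _ => Iff.rfl)]
      · congr 1
        rw [Function.update_apply, if_pos rfl]
      · intro wlen hwlen
        have h1 : 1 ≤ wlen := hL' wlen hwlen
        rw [Function.update_apply, if_neg (by omega)]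
    · rw [if_neg hc, if_neg hc, ih hL' d]

-- invariant of A's outer loop: after k steps cell j holds FF j for j ≤ k and 0 above
theorem A_inv (text : String) (known_set : List String) :
    ∀ k, k ≤ text.toList.length → ∀ j,
    ((List.range' 1 k).foldl (sA text known_set) (fun _ => 0)) j
      = if j ≤ k then FF text known_set j else 0 := by
  intro k
  induction k with
  | zero =>
    intro _ j
    simp only [List.range', List.foldl_nil]
    by_cases h : j ≤ 0
    · rw [if_pos h]
      have : j = 0 := by omega
      subst this
      simp [FF]
    · rw [if_neg h]
  | succ k ih =>
    intro hk1 j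
    have hk : k ≤ text.toList.length := by omega
    rw [List.range'_concat, List.foldl_append, List.foldl_cons, List.foldl_nil]
    have hg := ih hk
    set g := (List.range' 1 k).foldl (sA text known_set) (fun _ => 0) with hgdef
    have h1k : 1 + 1 * k = k + 1 := by omega
    rw [h1k]
    show (List.range' 2 (min (k+1) 20 - 1)).foldl _
        (Function.update g (k+1) (g (k + 1 - 1))) j = _
    rw [foldA_inner text known_set (k+1) (by omega) _
        (fun w hw => by have := List.mem_range'_1.mp hw; omega)]
    set d := Function.update g (k+1) (g (k + 1 - 1)) with hddef
    have hdtop : d (k+1) = FF text known_set k := by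
      rw [hddef, Function.update_apply, if_pos rfl]
      have : k + 1 - 1 = k := by omega
      rw [this, hg k, if_pos le_rfl]
    have hmf : mfold (fun (wlen : Nat) => d (k + 1 - wlen) + (wlen : Int))
        (fun wlen => PySem.Str.slice text (some ((k + 1 - wlen : Nat) : Int)) (some ((k + 1 : Nat) : Int)) ∈ known_set)
        (d (k+1)) (List.range' 2 (min (k+1) 20 - 1)) = FF text known_set (k+1) := by
      rw [hdtop, FF_succ]
      rw [mfold_congr (v' := fun wlen => FF text known_set (k + 1 - wlen) + (wlen : Int))
          (c' := fun (wlen : Nat) =>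
            PySem.Str.slice text (some ((k + 1 - wlen : Nat) : Int)) (some ((k + 1 : Nat) : Int)) ∈ known_set)
          (hv := ?_) (hc := fun x _ => Iff.rfl)]
      intro wlen hwlen
      have hw2 := List.mem_range'_1.mp hwlen
      rw [hddef, Function.update_apply, if_neg (by omega), hg, if_pos (by omega)]
    rw [hmf, Function.update_apply]
    by_cases hj : j = k + 1
    · rw [if_pos hj, hj, if_pos le_rfl]
    · rw [if_neg hj, hddef, Function.update_apply, if_neg hj, hg]
      by_cases hjk : j ≤ k
      · rw [if_pos hjk, if_pos (by omega)]
      · rw [if_neg hjk, if_neg (by omega)]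

-- ---------- B side ----------

-- the occurrence-index map built by B's stage 1
def sbeF (text : String) (known_set : List String) (n : Nat) : Nat → List Nat :=
  (PySem.List.dedup known_set).foldl (fun m w =>
    let L := w.toList.length
    if 2 ≤ L ∧ L ≤ 20 then
      occLoop text w L (n + 1) (PySem.Str.find text w) m
    else m) (fun _ => [])

-- the interval predicate the index stores: word w (length L) occurs at [s, s+L) and s+L = e
def Occ (text : String) (known_set : List String) (n e s : Nat) : Prop :=
  ∃ w ∈ known_set, 2 ≤ w.toList.length ∧ w.toList.length ≤ 20 ∧ s + w.toList.length = e ∧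
    s + w.toList.length ≤ n ∧
    PySem.Str.slice text (some ((s : Nat) : Int)) (some ((s + w.toList.length : Nat) : Int)) = w

theorem occLoop_mem (text w : String) (hL : 1 ≤ w.toList.length) :
    ∀ (fuel k : Nat) (m : Nat → List Nat), k ≤ text.toList.length →
      text.toList.length + 1 - k ≤ fuel → ∀ e s',
      (s' ∈ occLoop text w w.toList.length fuel
          (PySem.Str.findFrom text w ((k : Nat) : Int) none) m e
        ↔ s' ∈ m e ∨ (k ≤ s' ∧ w.toList <+: text.toList.drop s' ∧ s' + w.toList.length = e)) := by
  intro fuel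
  induction fuel with
  | zero => intro k m hk hf; omega
  | succ fuel ih =>
    intro k m hk hf e s'
    rw [occLoop]
    by_cases hr : PySem.Str.findFrom text w ((k : Nat) : Int) none = -1
    · rw [if_pos hr]
      have hinf : ¬ w.toList <:+: text.toList.drop k := by
        rw [PySem.Str.findFrom_eq] at hr
        exact (PySem.Chars.findFrom_natCast_eq_neg_one_iff text.toList w.toList k hk).mp hr
      constructor
      · exact Or.inl
      · rintro (hm | ⟨hks, hpre, _⟩)
        · exact hm
        · exfalso
          apply hinf
          have hdd : text.toList.drop s' = (text.toList.drop k).drop (s' - k) := by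
            rw [List.drop_drop]; congr 1; omega
          have hsfx : text.toList.drop s' <:+ text.toList.drop k := by
            rw [hdd]; exact List.drop_suffix _ _
          exact hpre.isInfix.trans hsfx.isInfix
    · rw [if_neg hr]
      set r := PySem.Str.findFrom text w ((k : Nat) : Int) none with hrdef
      have hr' : PySem.Chars.findFrom text.toList w.toList ((k : Nat) : Int) none ≠ -1 := by
        rw [← PySem.Str.findFrom_eq]; exact hr
      obtain ⟨hkr, hpre, hmin⟩ := PySem.Chars.findFrom_natCast_spec text.toList w.toList k hk hr'
      rw [← PySem.Str.findFrom_eq, ← hrdef] at hkr hpre hmin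
      have hr0 : 0 ≤ r := le_trans (by positivity) hkr
      have hkr' : k ≤ r.toNat := by omega
      have hlen := hpre.length_le
      rw [List.length_drop] at hlen
      have hrn : r.toNat + w.toList.length ≤ text.toList.length := by omega
      have hcast : (r + 1 : Int) = ((r.toNat + 1 : Nat) : Int) := by omega
      rw [hcast, ih (r.toNat + 1) _ (by omega) (by omega) e s']
      constructor
      · rintro (hm | ⟨h1, h2, h3⟩)
        · rw [Function.update_apply] at hm
          by_cases he : e = r.toNat + w.toList.length
          · rw [if_pos he] at hm
            rcases List.mem_append.mp hm with hm | hm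
            · exact Or.inl (by rw [he]; exact hm)
            · have hs : s' = r.toNat := by simpa using hm
              subst hs
              exact Or.inr ⟨by omega, hpre, he.symm⟩
          · rw [if_neg he] at hm
            exact Or.inl hm
        · exact Or.inr ⟨by omega, h2, h3⟩
      · rintro (hm | ⟨h1, h2, h3⟩)
        · left
          rw [Function.update_apply]
          by_cases he : e = r.toNat + w.toList.length
          · rw [if_pos he]; exact List.mem_append.mpr (Or.inl (by rw [← he]; exact hm))
          · rw [if_neg he]; exact hm
        · by_cases hs'r : s' = r.toNat
          · subst hs'r
            left
            rw [Function.update_apply, if_pos h3.symm]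
            exact List.mem_append.mpr (Or.inr (by simp))
          · by_cases hge : r.toNat + 1 ≤ s'
            · exact Or.inr ⟨hge, h2, h3⟩
            · exact absurd h2 (hmin s' h1 (by omega))

-- an occurrence of w at s' (as a prefix of the suffix) is exactly an in-range equal slice
theorem slice_eq_iff_prefix (text w : String) (s' : Nat) (hL : 1 ≤ w.toList.length) :
    (s' + w.toList.length ≤ text.toList.length ∧
     PySem.Str.slice text (some ((s' : Nat) : Int)) (some ((s' + w.toList.length : Nat) : Int)) = w)
    ↔ w.toList <+: text.toList.drop s' := by
  have harith : s' + w.toList.length - s' = w.toList.length := by omega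
  constructor
  · rintro ⟨hb, hsl⟩
    have h := congrArg String.toList hsl
    rw [PySem.Str.toList_slice, PySem.Chars.slice_eq_listSlice, PySem.List.slice_natCast,
      harith] at h
    rw [← h]
    exact List.take_prefix _ _
  · intro hpre
    have hlen := hpre.length_le
    rw [List.length_drop] at hlen
    refine ⟨by omega, ?_⟩
    apply String.toList_inj.mp
    rw [PySem.Str.toList_slice, PySem.Chars.slice_eq_listSlice, PySem.List.slice_natCast, harith]
    exact (List.prefix_iff_eq_take.mp hpre).symm

theorem mem_sbeF_aux (text : String) :
    ∀ (ks : List String) (m : Nat → List Nat) (e s : Nat),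
    (s ∈ (ks.foldl (fun m w =>
        let L := w.toList.length
        if 2 ≤ L ∧ L ≤ 20 then
          occLoop text w L (text.toList.length + 1) (PySem.Str.find text w) m
        else m) m) e)
    ↔ s ∈ m e ∨ ∃ w ∈ ks, 2 ≤ w.toList.length ∧ w.toList.length ≤ 20 ∧
        s + w.toList.length = e ∧ s + w.toList.length ≤ text.toList.length ∧
        PySem.Str.slice text (some ((s : Nat) : Int)) (some ((s + w.toList.length : Nat) : Int)) = w := by
  intro ks
  induction ks with
  | nil => intro m e s; simp
  | cons w ks ih =>
    intro m e s
    rw [List.foldl_cons]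
    by_cases hf : 2 ≤ w.toList.length ∧ w.toList.length ≤ 20
    · show (s ∈ (ks.foldl _ (if 2 ≤ w.toList.length ∧ w.toList.length ≤ 20 then _ else m)) e) ↔ _
      rw [if_pos hf, ih]
      have hfind : PySem.Str.find text w = PySem.Str.findFrom text w ((0 : Nat) : Int) none := by
        rw [PySem.Str.findFrom_eq, PySem.Str.find_eq]
        simp [PySem.Chars.findFrom_zero]
      rw [hfind, occLoop_mem text w (by omega) (text.toList.length + 1) 0 m (by omega) (by omega) e s]
      constructor
      · rintro ((hm | ⟨_, hpre, he⟩) | ⟨w', hw', hprop⟩)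
        · exact Or.inl hm
        · obtain ⟨hb, hsl⟩ := (slice_eq_iff_prefix text w s (by omega)).mpr hpre
          exact Or.inr ⟨w, List.mem_cons_self, hf.1, hf.2, he, hb, hsl⟩
        · exact Or.inr ⟨w', List.mem_cons_of_mem _ hw', hprop⟩
      · rintro (hm | ⟨w', hw', h2, h20, he, hsn, hsl⟩)
        · exact Or.inl (Or.inl hm)
        · rcases List.mem_cons.mp hw' with hww | hw'
          · rw [hww] at h2 h20 he hsn hsl
            have hpre := (slice_eq_iff_prefix text w s (by omega)).mp ⟨hsn, hsl⟩
            exact Or.inl (Or.inr ⟨Nat.zero_le s, hpre, he⟩)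
          · exact Or.inr ⟨w', hw', h2, h20, he, hsn, hsl⟩
    · show (s ∈ (ks.foldl _ (if 2 ≤ w.toList.length ∧ w.toList.length ≤ 20 then _ else m)) e) ↔ _
      rw [if_neg hf, ih]
      constructor
      · rintro (hm | ⟨w', hw', hprop⟩)
        · exact Or.inl hm
        · exact Or.inr ⟨w', List.mem_cons_of_mem _ hw', hprop⟩
      · rintro (hm | ⟨w', hw', h2, h20, he, hsn, hsl⟩)
        · exact Or.inl hm
        · rcases List.mem_cons.mp hw' with hww | hw'
          · subst hww; exact absurd ⟨h2, h20⟩ hf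
          · exact Or.inr ⟨w', hw', h2, h20, he, hsn, hsl⟩

-- membership in the built index is exactly Occ
theorem mem_sbeF (text : String) (known_set : List String) (e s : Nat) :
    s ∈ sbeF text known_set text.toList.length e ↔ Occ text known_set text.toList.length e s := by
  rw [sbeF, mem_sbeF_aux text (PySem.List.dedup known_set) (fun _ => []) e s, Occ]
  simp

-- length of a slice text[s:e] for s ≤ e ≤ n is e - s
theorem slice_length (text : String) (s e : Nat) (hse : s ≤ e) (hen : e ≤ text.toList.length) :
    (PySem.Str.slice text (some ((s : Nat) : Int)) (some ((e : Nat) : Int))).toList.length = e - s := by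
  rw [PySem.Str.toList_slice, PySem.Chars.slice_eq_listSlice, PySem.List.slice_natCast]
  rw [List.length_take, List.length_drop]
  omega

-- the pull fold of FF and the fold over the occurrence index agree
theorem FF_eq_sbe (text : String) (known_set : List String) (k : Nat)
    (hk : k + 1 ≤ text.toList.length) :
    FF text known_set (k+1)
      = mfold (fun (s : Nat) => FF text known_set s + ((k + 1 - s : Nat) : Int)) (fun _ => True)
          (FF text known_set k) (sbeF text known_set (text.toList.length) (k+1)) := by
  apply le_antisymm
  · rw [FF_succ]
    refine mfold_le _ _ _ ?_ _ (base_le_mfold _ _ _ _)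
    intro wlen hmem hc
    have hw := List.mem_range'_1.mp hmem
    set s0 := k + 1 - wlen with hs0
    set w : String := PySem.Str.slice text (some ((s0 : Nat) : Int)) (some ((k + 1 : Nat) : Int)) with hwdef
    have hlen : w.toList.length = wlen := by
      rw [hwdef, slice_length text s0 (k+1) (by omega) hk]
      omega
    have hmemS : s0 ∈ sbeF text known_set text.toList.length (k+1) := by
      rw [mem_sbeF]
      refine ⟨w, hc, by omega, by omega, by omega, by omega, ?_⟩
      have hidx : s0 + w.toList.length = k + 1 := by omega
      rw [hidx]
    have hle := le_mfold_of_mem (fun s => FF text known_set s + ((k + 1 - s : Nat) : Int))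
      (fun _ => True) hmemS trivial (FF text known_set k)
    have harith : (k + 1) - s0 = wlen := by omega
    rw [harith] at hle
    exact hle
  · refine mfold_le _ _ _ ?_ _ (FF_le_succ text known_set k)
    intro s0 hs0 _
    rw [mem_sbeF] at hs0
    obtain ⟨w, hw, h2, h20, he, hsn, hsl⟩ := hs0
    rw [FF_succ]
    have hmem' : w.toList.length ∈ List.range' 2 (min (k+1) 20 - 1) :=
      List.mem_range'_1.mpr (by omega)
    have hki : k + 1 - w.toList.length = s0 := by omega
    have hcond : PySem.Str.slice text (some ((k + 1 - w.toList.length : Nat) : Int))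
        (some ((k + 1 : Nat) : Int)) ∈ known_set := by
      rw [hki, ← he, hsl]
      exact hw
    have hle := le_mfold_of_mem
      (fun wlen => FF text known_set (k + 1 - wlen) + (wlen : Int))
      (fun wlen => PySem.Str.slice text (some ((k + 1 - wlen : Nat) : Int)) (some ((k + 1 : Nat) : Int)) ∈ known_set)
      hmem' hcond (FF text known_set k)
    rw [hki] at hle
    have harith : (k + 1) - s0 = w.toList.length := by omega
    rw [harith]
    exact hle

-- B's stage-2 loop body, definitionally the inline lambda of dp_score_alt
def sB (text : String) (known_set : List String) (n : Nat) : (Nat → Int) → Nat → (Nat → Int) :=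
  fun dp e =>
    Function.update dp e
      ((sbeF text known_set n e).foldl (fun best s =>
        if dp s + ((e - s : Nat) : Int) > best
        then dp s + ((e - s : Nat) : Int) else best)
        (dp (e - 1)))

-- invariant of B's stage-2 loop: after k steps cell j holds FF j for j ≤ k and 0 above
theorem B_inv (text : String) (known_set : List String) :
    ∀ k, k ≤ text.toList.length → ∀ j,
    ((List.range' 1 k).foldl (sB text known_set text.toList.length) (fun _ => 0)) j
      = if j ≤ k then FF text known_set j else 0 := by
  intro k
  induction k with
  | zero =>
    intro _ j
    simp only [List.range', List.foldl_nil]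
    by_cases h : j ≤ 0
    · rw [if_pos h]
      have : j = 0 := by omega
      subst this
      simp [FF]
    · rw [if_neg h]
  | succ k ih =>
    intro hk1 j
    have hk : k ≤ text.toList.length := by omega
    rw [List.range'_concat, List.foldl_append, List.foldl_cons, List.foldl_nil]
    have hg := ih hk
    set g := (List.range' 1 k).foldl (sB text known_set text.toList.length) (fun _ => 0) with hgdef
    have h1k : 1 + 1 * k = k + 1 := by omega
    rw [h1k]
    show (Function.update g (k+1)
      ((sbeF text known_set text.toList.length (k+1)).foldl (fun best s =>
        if g s + ((k + 1 - s : Nat) : Int) > best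
        then g s + ((k + 1 - s : Nat) : Int) else best) (g (k + 1 - 1)))) j = _
    rw [foldl_if_gt_eq_mfold (fun s => g s + ((k + 1 - s : Nat) : Int))]
    have hgk : g (k + 1 - 1) = FF text known_set k := by
      have h0 : k + 1 - 1 = k := rfl
      rw [h0, hg k, if_pos le_rfl]
    have hmf : mfold (fun s => g s + ((k + 1 - s : Nat) : Int)) (fun _ => True)
        (g (k + 1 - 1)) (sbeF text known_set text.toList.length (k+1)) = FF text known_set (k+1) := by
      rw [hgk]
      rw [mfold_congr (v' := fun s => FF text known_set s + ((k + 1 - s : Nat) : Int))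
          (c' := fun _ => True) (hv := ?_) (hc := fun _ _ => Iff.rfl)]
      · exact (FF_eq_sbe text known_set k hk1).symm
      · intro s hs
        rw [mem_sbeF] at hs
        obtain ⟨w, hw, h2, h20, he, hsn, hsl⟩ := hs
        have hsk : s ≤ k := by omega
        rw [hg s, if_pos hsk]
    rw [hmf, Function.update_apply]
    by_cases hj : j = k + 1
    · rw [if_pos hj, hj, if_pos le_rfl]
    · rw [if_neg hj, hg j]
      by_cases hjk : j ≤ k
      · rw [if_pos hjk, if_pos (by omega)]
      · rw [if_neg hjk, if_neg (by omega)]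

-- ===== VERDICT (by name: the statement is the Claim_ definition above) =====
theorem dp_score_spec : Claim_equal_dp_score := by
  intro text known_set _h
  unfold Spec_dp_score
  have hA : dp_score text known_set = FF text known_set text.toList.length := by
    have h := A_inv text known_set text.toList.length le_rfl text.toList.length
    rw [if_pos le_rfl] at h
    exact h
  have hB : dp_score_alt text known_set = FF text known_set text.toList.length := by
    have h := B_inv text known_set text.toList.length le_rfl text.toList.length
    rw [if_pos le_rfl] at h
    exact h
  rw [hA, hB]
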